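-- pv_equiv track=rewrite | github.com/simulatedScience/Twisty_Puzzle_Program | src/policy_anaysis/action_histogram.py | action_histogram
-- ===== SOURCE A (Python) =====
-- from collections import Counter
--
-- def categorize_actions(actions):
--     algs, rots, base_moves = [], [], []
--
--     for action in actions:
--         if action.startswith('alg_'):
--             algs.append(action)
--         elif action.startswith('rot_'):
--             rots.append(action)
--         else:
--             base_moves.append(action)
--
--     return algs, rots, base_moves
--
-- def action_histogram(runs):
--     """Return histograms of actions grouped by category across all runs."""
--     total_actions = 0
--     alg_counter, rot_counter, base_counter = Counter(), Counter(), Counter()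
--
--     for run in runs:
--         actions = run.get("agent_moves:", "").split()  # Split the string into individual actions
--         total_actions += len(actions)
--         algs, rots, base_moves = categorize_actions(actions)
--
--         alg_counter.update(algs)
--         rot_counter.update(rots)
--         base_counter.update(base_moves)
--
--     return alg_counter, rot_counter, base_counter, total_actions
-- ===== SOURCE B (Python) =====
-- from collections import Counter
--
-- def action_histogram(runs):
--     """Return histograms of actions grouped by category across all runs."""
--     total_actions = 0
--     combined = Counter()
--     for run in runs:
--         actions = run.get("agent_moves:", "").split()
--         total_actions += len(actions)
--         combined.update(actions)
--     alg_counter, rot_counter, base_counter = Counter(), Counter(), Counter()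
--     for action, count in combined.items():
--         if action.startswith('alg_'):
--             alg_counter[action] = count
--         elif action.startswith('rot_'):
--             rot_counter[action] = count
--         else:
--             base_counter[action] = count
--     return alg_counter, rot_counter, base_counter, total_actions
-- ===== Notes on version B (the rewrite author's own statement) =====
-- stated objective: alternative
-- what changed: Instead of splitting each run's actions into three lists and maintaining three Counters inside the loop, B maintains a single combined Counter (plus the total) during the scan and then routes each distinct aggregated (action, count) pair into the three category Counters in one separate pass over combined.items().
import Mathlib
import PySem

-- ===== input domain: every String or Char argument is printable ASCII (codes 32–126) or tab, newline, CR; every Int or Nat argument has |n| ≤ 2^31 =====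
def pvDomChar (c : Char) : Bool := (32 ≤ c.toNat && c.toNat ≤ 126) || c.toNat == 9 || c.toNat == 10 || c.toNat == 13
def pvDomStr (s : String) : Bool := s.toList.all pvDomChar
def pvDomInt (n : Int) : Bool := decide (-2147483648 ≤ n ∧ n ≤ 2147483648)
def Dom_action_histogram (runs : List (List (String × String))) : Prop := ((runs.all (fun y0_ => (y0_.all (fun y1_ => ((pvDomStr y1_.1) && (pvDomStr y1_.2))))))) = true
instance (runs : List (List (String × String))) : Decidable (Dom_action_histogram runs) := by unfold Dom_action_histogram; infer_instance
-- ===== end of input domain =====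

-- B replaces A's per-run three-way split feeding three Counters by a single combined
-- Counter maintained during the scan, routed into the three category Counters afterwards
-- (alternative decomposition, same asymptotic cost).


-- ===== PORT A =====
def categorize_actions (actions : List String) : List String × List String × List String :=
  actions.foldl (fun acc action =>
    if PySem.Str.startswith action "alg_" then (acc.1 ++ [action], acc.2.1, acc.2.2)
    else if PySem.Str.startswith action "rot_" then (acc.1, acc.2.1 ++ [action], acc.2.2)
    else (acc.1, acc.2.1, acc.2.2 ++ [action])) ([], [], [])

def action_histogram (runs : List (List (String × String))) : (List (String × Int)) × (List (String × Int)) × (List (String × Int)) × Int :=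
  let st := runs.foldl
    (fun (st : PySem.Dict String Int × PySem.Dict String Int × PySem.Dict String Int × Int) run =>
      let actions := PySem.Str.split₀ ((PySem.Dict.ofList run).getD "agent_moves:" "")
      let total := st.2.2.2 + (actions.length : Int)
      let c := categorize_actions actions
      (c.1.foldl (fun d x => d.modify x 0 (· + 1)) st.1,
       c.2.1.foldl (fun d x => d.modify x 0 (· + 1)) st.2.1,
       c.2.2.foldl (fun d x => d.modify x 0 (· + 1)) st.2.2.1,
       total))
    (PySem.Dict.empty, PySem.Dict.empty, PySem.Dict.empty, 0)
  (st.1.items, st.2.1.items, st.2.2.1.items, st.2.2.2)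

-- ===== PORT B =====
def action_histogram_alt (runs : List (List (String × String))) : (List (String × Int)) × (List (String × Int)) × (List (String × Int)) × Int :=
  let st := runs.foldl
    (fun (st : PySem.Dict String Int × Int) run =>
      let actions := PySem.Str.split₀ ((PySem.Dict.ofList run).getD "agent_moves:" "")
      (actions.foldl (fun d x => d.modify x 0 (· + 1)) st.1, st.2 + (actions.length : Int)))
    (PySem.Dict.empty, 0)
  let routed := st.1.items.foldl
    (fun (acc : PySem.Dict String Int × PySem.Dict String Int × PySem.Dict String Int) p =>
      if PySem.Str.startswith p.1 "alg_" then (acc.1.insert p.1 p.2, acc.2.1, acc.2.2)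
      else if PySem.Str.startswith p.1 "rot_" then (acc.1, acc.2.1.insert p.1 p.2, acc.2.2)
      else (acc.1, acc.2.1, acc.2.2.insert p.1 p.2))
    (PySem.Dict.empty, PySem.Dict.empty, PySem.Dict.empty)
  (routed.1.items, routed.2.1.items, routed.2.2.items, st.2)

-- ===== PRECONDITION & SPEC =====
def Spec_action_histogram (runs : List (List (String × String))) (out : (List (String × Int)) × (List (String × Int)) × (List (String × Int)) × Int) : Prop := out = action_histogram_alt runs
instance (runs : List (List (String × String))) (out : (List (String × Int)) × (List (String × Int)) × (List (String × Int)) × Int) : Decidable (Spec_action_histogram runs out) := by unfold Spec_action_histogram; infer_instance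

-- ===== CLAIM (what is proved, stated in full; the proofs are below) =====
def Claim_equal_action_histogram : Prop := ∀ (runs : List (List (String × String))), Dom_action_histogram runs → Spec_action_histogram runs (action_histogram runs)

-- ===== LEMMAS AND PROOFS =====

-- the word stream of one run, and the concatenated stream of all runs
def pvWords (run : List (String × String)) : List String :=
  PySem.Str.split₀ ((PySem.Dict.ofList run).getD "agent_moves:" "")

def pvAlg (a : String) : Bool := PySem.Str.startswith a "alg_"
def pvRot (a : String) : Bool := !PySem.Str.startswith a "alg_" && PySem.Str.startswith a "rot_"
def pvBase (a : String) : Bool := !PySem.Str.startswith a "alg_" && !PySem.Str.startswith a "rot_"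

def pvCfold (l : List String) (d : PySem.Dict String Int) : PySem.Dict String Int :=
  l.foldl (fun d x => d.modify x 0 (· + 1)) d

theorem categorize_aux (actions l1 l2 l3 : List String) :
    actions.foldl (fun acc action =>
      if PySem.Str.startswith action "alg_" then (acc.1 ++ [action], acc.2.1, acc.2.2)
      else if PySem.Str.startswith action "rot_" then (acc.1, acc.2.1 ++ [action], acc.2.2)
      else (acc.1, acc.2.1, acc.2.2 ++ [action])) (l1, l2, l3) =
    (l1 ++ actions.filter pvAlg, l2 ++ actions.filter pvRot, l3 ++ actions.filter pvBase) := by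
  induction actions generalizing l1 l2 l3 with
  | nil => simp
  | cons a rest ih =>
    rw [List.foldl_cons]
    by_cases h1 : PySem.Str.startswith a "alg_"
    · have e1 : pvAlg a = true := h1
      have e2 : pvRot a = false := by unfold pvRot; rw [h1]; rfl
      have e3 : pvBase a = false := by unfold pvBase; rw [h1]; rfl
      rw [if_pos h1, ih, List.filter_cons, List.filter_cons, List.filter_cons, e1, e2, e3]
      simp
    · have h1' : PySem.Str.startswith a "alg_" = false := Bool.eq_false_iff.mpr h1
      have e1 : pvAlg a = false := h1'
      by_cases h2 : PySem.Str.startswith a "rot_"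
      · have e2 : pvRot a = true := by unfold pvRot; rw [h1', h2]; rfl
        have e3 : pvBase a = false := by unfold pvBase; rw [h1', h2]; rfl
        rw [if_neg h1, if_pos h2, ih, List.filter_cons, List.filter_cons, List.filter_cons,
          e1, e2, e3]
        simp
      · have h2' : PySem.Str.startswith a "rot_" = false := Bool.eq_false_iff.mpr h2
        have e2 : pvRot a = false := by unfold pvRot; rw [h1', h2']; rfl
        have e3 : pvBase a = true := by unfold pvBase; rw [h1', h2']; rfl
        rw [if_neg h1, if_neg h2, ih, List.filter_cons, List.filter_cons, List.filter_cons,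
          e1, e2, e3]
        simp

theorem categorize_eq_filter (actions : List String) :
    categorize_actions actions =
      (actions.filter pvAlg, actions.filter pvRot, actions.filter pvBase) := by
  simpa using categorize_aux actions [] [] []

theorem a_loop (runs : List (List (String × String)))
    (d1 d2 d3 : PySem.Dict String Int) (n : Int) :
    runs.foldl
      (fun (st : PySem.Dict String Int × PySem.Dict String Int × PySem.Dict String Int × Int) run =>
        let actions := PySem.Str.split₀ ((PySem.Dict.ofList run).getD "agent_moves:" "")
        let total := st.2.2.2 + (actions.length : Int)
        let c := categorize_actions actions
        (c.1.foldl (fun d x => d.modify x 0 (· + 1)) st.1,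
         c.2.1.foldl (fun d x => d.modify x 0 (· + 1)) st.2.1,
         c.2.2.foldl (fun d x => d.modify x 0 (· + 1)) st.2.2.1,
         total))
      (d1, d2, d3, n) =
    (pvCfold ((runs.flatMap pvWords).filter pvAlg) d1,
     pvCfold ((runs.flatMap pvWords).filter pvRot) d2,
     pvCfold ((runs.flatMap pvWords).filter pvBase) d3,
     n + ((runs.flatMap pvWords).length : Int)) := by
  induction runs generalizing d1 d2 d3 n with
  | nil => simp [pvCfold]
  | cons r rest ih =>
    simp only [List.foldl_cons, List.flatMap_cons, List.filter_append, List.length_append]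
    rw [categorize_eq_filter, ih]
    simp only [pvCfold, List.foldl_append, pvWords]
    push_cast
    ring_nf

theorem b_loop (runs : List (List (String × String)))
    (d : PySem.Dict String Int) (n : Int) :
    runs.foldl
      (fun (st : PySem.Dict String Int × Int) run =>
        let actions := PySem.Str.split₀ ((PySem.Dict.ofList run).getD "agent_moves:" "")
        (actions.foldl (fun d x => d.modify x 0 (· + 1)) st.1, st.2 + (actions.length : Int)))
      (d, n) =
    (pvCfold (runs.flatMap pvWords) d, n + ((runs.flatMap pvWords).length : Int)) := by
  induction runs generalizing d n with
  | nil => simp [pvCfold]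
  | cons r rest ih =>
    simp only [List.foldl_cons, List.flatMap_cons, List.length_append]
    rw [ih]
    simp only [pvCfold, List.foldl_append, pvWords]
    push_cast
    ring_nf

theorem route_items (ps : List (String × Int))
    (da db dc : PySem.Dict String Int)
    (ha : ∀ p ∈ ps, da.contains p.1 = false)
    (hb : ∀ p ∈ ps, db.contains p.1 = false)
    (hc : ∀ p ∈ ps, dc.contains p.1 = false)
    (hnd : (ps.map Prod.fst).Nodup) :
    (ps.foldl
      (fun (acc : PySem.Dict String Int × PySem.Dict String Int × PySem.Dict String Int) p =>
        if PySem.Str.startswith p.1 "alg_" then (acc.1.insert p.1 p.2, acc.2.1, acc.2.2)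
        else if PySem.Str.startswith p.1 "rot_" then (acc.1, acc.2.1.insert p.1 p.2, acc.2.2)
        else (acc.1, acc.2.1, acc.2.2.insert p.1 p.2))
      (da, db, dc)) =
    (PySem.Dict.mk (da.items ++ ps.filter (fun p => pvAlg p.1)),
     PySem.Dict.mk (db.items ++ ps.filter (fun p => pvRot p.1)),
     PySem.Dict.mk (dc.items ++ ps.filter (fun p => pvBase p.1))) := by
  induction ps generalizing da db dc with
  | nil => simp
  | cons p ps ih =>
    rw [List.map_cons, List.nodup_cons] at hnd
    obtain ⟨hp1, hnd⟩ := hnd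
    have hne : ∀ q ∈ ps, q.1 ≠ p.1 := by
      intro q hq h
      exact hp1 (h ▸ List.mem_map_of_mem hq)
    rw [List.foldl_cons]
    by_cases h1 : PySem.Str.startswith p.1 "alg_"
    · have e1 : pvAlg p.1 = true := h1
      have e2 : pvRot p.1 = false := by unfold pvRot; rw [h1]; rfl
      have e3 : pvBase p.1 = false := by unfold pvBase; rw [h1]; rfl
      rw [if_pos h1, ih (da.insert p.1 p.2) db dc
        (by
          intro q hq
          rw [PySem.Dict.contains_insert]
          simp [hne q hq, ha q (List.mem_cons_of_mem _ hq)])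
        (fun q hq => hb q (List.mem_cons_of_mem _ hq))
        (fun q hq => hc q (List.mem_cons_of_mem _ hq)) hnd,
        PySem.Dict.items_insert_of_not_contains _ _ (ha p List.mem_cons_self),
        List.filter_cons, List.filter_cons, List.filter_cons, e1, e2, e3]
      simp
    · by_cases h2 : PySem.Str.startswith p.1 "rot_"
      · have e1 : pvAlg p.1 = false := Bool.eq_false_iff.mpr h1
        have e2 : pvRot p.1 = true := by unfold pvRot; rw [Bool.eq_false_iff.mpr h1, h2]; rfl
        have e3 : pvBase p.1 = false := by unfold pvBase; rw [Bool.eq_false_iff.mpr h1, h2]; rfl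
        rw [if_neg h1, if_pos h2, ih da (db.insert p.1 p.2) dc
          (fun q hq => ha q (List.mem_cons_of_mem _ hq))
          (by
            intro q hq
            rw [PySem.Dict.contains_insert]
            simp [hne q hq, hb q (List.mem_cons_of_mem _ hq)])
          (fun q hq => hc q (List.mem_cons_of_mem _ hq)) hnd,
          PySem.Dict.items_insert_of_not_contains _ _ (hb p List.mem_cons_self),
          List.filter_cons, List.filter_cons, List.filter_cons, e1, e2, e3]
        simp
      · have e1 : pvAlg p.1 = false := Bool.eq_false_iff.mpr h1
        have e2 : pvRot p.1 = false := by
          unfold pvRot; rw [Bool.eq_false_iff.mpr h1, Bool.eq_false_iff.mpr h2]; rfl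
        have e3 : pvBase p.1 = true := by
          unfold pvBase; rw [Bool.eq_false_iff.mpr h1, Bool.eq_false_iff.mpr h2]; rfl
        rw [if_neg h1, if_neg h2, ih da db (dc.insert p.1 p.2)
          (fun q hq => ha q (List.mem_cons_of_mem _ hq))
          (fun q hq => hb q (List.mem_cons_of_mem _ hq))
          (by
            intro q hq
            rw [PySem.Dict.contains_insert]
            simp [hne q hq, hc q (List.mem_cons_of_mem _ hq)]) hnd,
          PySem.Dict.items_insert_of_not_contains _ _ (hc p List.mem_cons_self),
          List.filter_cons, List.filter_cons, List.filter_cons, e1, e2, e3]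
        simp

theorem ofList_filter (p : String → Bool) (l : List String) :
    PySem.Set.ofList (l.filter p) = (PySem.Set.ofList l).filter p := by
  induction l using List.reverseRecOn with
  | nil => rfl
  | append_singleton xs x ih =>
    rw [List.filter_append, PySem.Set.ofList_append_singleton]
    by_cases hp : p x
    · have hx : List.filter p [x] = [x] := by simp [hp]
      rw [hx, PySem.Set.ofList_append_singleton, ih]
      by_cases hm : x ∈ PySem.Set.ofList xs
      · rw [PySem.Set.add_of_mem hm,
          PySem.Set.add_of_mem (List.mem_filter.mpr ⟨hm, hp⟩)]
      · rw [PySem.Set.add_of_not_mem hm,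
          PySem.Set.add_of_not_mem (fun h => hm (List.mem_filter.mp h).1),
          List.filter_append, hx]
    · have hx : List.filter p [x] = [] := by simp [hp]
      rw [hx, List.append_nil, ih]
      by_cases hm : x ∈ PySem.Set.ofList xs
      · rw [PySem.Set.add_of_mem hm]
      · rw [PySem.Set.add_of_not_mem hm, List.filter_append, hx, List.append_nil]

theorem counter_filter_items (p : String → Bool) (l : List String) :
    (PySem.Dict.counter (l.filter p)).items =
      ((PySem.Dict.counter l).items).filter (fun q => p q.1) := by
  rw [PySem.Dict.items_counter, PySem.Dict.items_counter, List.filter_map, ofList_filter]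
  have hc : List.filter ((fun q => p q.1) ∘ fun k => ((k : String), (l.count k : Int)))
      (PySem.Set.ofList l) = List.filter p (PySem.Set.ofList l) := by
    simp [Function.comp_def]
  rw [hc]
  refine List.map_congr_left ?_
  intro k hk
  rw [List.count_filter (List.mem_filter.mp hk).2]

-- ===== VERDICT (by name: the statement is the Claim_ definition above) =====
theorem action_histogram_spec : Claim_equal_action_histogram := by
  intro runs _
  show _ = _
  unfold action_histogram action_histogram_alt
  rw [a_loop, b_loop]
  have hcnt : ∀ l : List String, pvCfold l PySem.Dict.empty = PySem.Dict.counter l := fun _ => rfl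
  simp only [hcnt]
  rw [route_items]
  · simp only [counter_filter_items]
    rfl
  · intro p _; exact rfl
  · intro p _; exact rfl
  · intro p _; exact rfl
  · exact PySem.Dict.nodup_keys_counter _
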